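-- pv_equiv track=rewrite | github.com/Ecodrin/Python_academy | Chapter_2/2.4/2_4_18_NG2.py | maxl
-- ===== SOURCE A (Python) =====
-- def maxl(n):
--     y = 1
--     k = 0
--     s = ''
--     ll = -1
--     for i in range(1, n + 1):
--         k += 1
--         if k == y or i == n:
--             s += str(i)
--             k = 0
--             y += 1
--             ll = max(ll, len(s))
--             s = ''
--         else:
--             s += str(i) + ' '
--     return ll
-- ===== SOURCE B (Python) =====
-- def maxl(n):
--     # closed-form digit-count prefix sums over O(sqrt(n)) triangular groups
--     def S(m):
--         # sum of len(str(i)) for i = 1..m, by digit-length blocks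
--         total = 0
--         p = 1
--         d = 1
--         while p <= m:
--             hi = min(m, p * 10 - 1)
--             total += (hi - p + 1) * d
--             p *= 10
--             d += 1
--         return total
--     best = -1
--     a = 1
--     g = 1
--     s_prev = 0
--     while a <= n:
--         e = min(a + g - 1, n)
--         s_e = S(e)
--         best = max(best, s_e - s_prev + (e - a))
--         s_prev = s_e
--         a = e + 1
--         g += 1
--     return best
-- ===== Notes on version B (the rewrite author's own statement) =====
-- stated objective: faster
-- what changed: A builds every group's space-separated string character by character over all n numbers; B never touches strings: it iterates only over the O(sqrt(n)) triangular groups and computes each group's length from a closed-form digit-count prefix sum S(m) evaluated per decimal-digit-length block.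
import Mathlib
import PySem

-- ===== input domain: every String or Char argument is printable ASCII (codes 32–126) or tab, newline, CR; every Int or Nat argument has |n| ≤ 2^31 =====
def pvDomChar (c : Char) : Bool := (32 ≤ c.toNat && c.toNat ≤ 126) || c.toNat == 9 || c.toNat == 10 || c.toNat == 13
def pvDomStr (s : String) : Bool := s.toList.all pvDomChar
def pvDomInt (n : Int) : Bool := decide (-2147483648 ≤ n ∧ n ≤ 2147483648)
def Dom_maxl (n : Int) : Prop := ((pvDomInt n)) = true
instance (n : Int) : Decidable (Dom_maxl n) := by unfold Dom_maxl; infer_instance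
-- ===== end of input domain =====

-- B replaces A's digit-by-digit string building (O(n·√n) characters appended) by iterating only over
-- the O(√n) triangular groups, computing each group's length from closed-form digit-count prefix sums.

-- ===== PORT A =====
-- A's loop body: state (y, k, s, ll); builds the group string and takes the max length.
def maxlStep (n : Int) (st : Int × Int × String × Int) (i : Int) : Int × Int × String × Int :=
  let k := st.2.1 + 1
  if k = st.1 ∨ i = n then
    (st.1 + 1, 0, "", max st.2.2.2 (PySem.Str.len (st.2.2.1 ++ PySem.Int.toStr i)))
  else
    (st.1, k, st.2.2.1 ++ PySem.Int.toStr i ++ " ", st.2.2.2)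

def maxl (n : Int) : Int :=
  ((PySem.List.pyRange 1 (n + 1) 1).foldl (maxlStep n) (1, 0, "", -1)).2.2.2

-- ===== PORT B =====
-- B's helper S(m) = sum of len(str(i)) for i = 1..m, one digit-length block per iteration.
-- (The fuel argument only bounds the while loop to make it total; it is always sufficient
--  at the call sites, which the spec lemma below proves.)
def maxlS : Nat → Int → Int → Int → Int → Int
  | 0, _, _, _, total => total
  | fuel + 1, m, p, d, total =>
    if p ≤ m then
      maxlS fuel m (p * 10) (d + 1) (total + (min m (p * 10 - 1) - p + 1) * d)
    else total

-- B's group loop: a = first number of the group, g = group size, best = max so far,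
-- sPrev = S(a-1).  (fuel: totality bound for the while loop, always sufficient.)
def maxlLoop : Nat → Int → Int → Int → Int → Int → Int
  | 0, _, _, _, best, _ => best
  | fuel + 1, n, a, g, best, sPrev =>
    if a ≤ n then
      let e := min (a + g - 1) n
      let se := maxlS (e + 1).toNat e 1 1 0
      maxlLoop fuel n (e + 1) (g + 1) (max best (se - sPrev + (e - a))) se
    else best

def maxl_alt (n : Int) : Int :=
  maxlLoop (n + 1).toNat n 1 1 (-1) 0

-- ===== PRECONDITION & SPEC =====
def Spec_maxl (n : Int) (out : Int) : Prop := out = maxl_alt n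
instance (n : Int) (out : Int) : Decidable (Spec_maxl n out) := by unfold Spec_maxl; infer_instance

-- ===== CLAIM (what is proved, stated in full; the proofs are below) =====
def Claim_equal_maxl : Prop := ∀ (n : Int), Dom_maxl n → Spec_maxl n (maxl n)

-- ===== LEMMAS AND PROOFS =====

-- len(str(i)) as an Int
def slen (i : Int) : Int := PySem.Str.len (PySem.Int.toStr i)

-- number of decimal digits of a natural number
def nd (m : Nat) : Nat :=
  if m < 10 then 1 else 1 + nd (m / 10)
decreasing_by omega

-- sum of len(str(i)) over the half-open integer range [a, b)
def dsum (a b : Int) : Int := ((PySem.List.pyRange a b 1).map slen).sum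

theorem toDigitsCore_length (fuel : Nat) : ∀ (m : Nat) (acc : List Char), m < fuel →
    (Nat.toDigitsCore 10 fuel m acc).length = nd m + acc.length := by
  induction fuel with
  | zero => intro m acc h; omega
  | succ f ih =>
    intro m acc h
    rw [Nat.toDigitsCore]
    by_cases h10 : m / 10 = 0
    · have hm : m < 10 := by omega
      rw [nd, if_pos hm, if_pos h10]
      simp
      omega
    · have hm : ¬ m < 10 := by omega
      rw [nd, if_neg hm]
      rw [if_neg h10, ih (m / 10) _ (by omega)]
      simp
      omega

theorem slen_eq_nd (i : Int) (h : 1 ≤ i) : slen i = (nd i.toNat : Int) := by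
  have hneg : ¬ i < 0 := by omega
  unfold slen
  rw [PySem.Str.len, PySem.Int.toList_toStr]
  rw [PySem.Int.toChars, if_neg hneg]
  rw [Nat.toDigits, toDigitsCore_length (i.toNat + 1) i.toNat [] (by omega)]
  simp

theorem nd_block : ∀ (d : Nat) (m : Nat), 10 ^ d ≤ m → m < 10 ^ (d + 1) → nd m = d + 1 := by
  intro d
  induction d with
  | zero =>
    intro m h1 h2
    rw [nd, if_pos (by simpa using h2)]
  | succ d ih =>
    intro m h1 h2
    have hten : (10 : Nat) ≤ 10 ^ (d + 1) := Nat.le_self_pow (by omega) 10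
    have h10 : 10 ≤ m := le_trans hten h1
    have hdiv1 : 10 ^ d ≤ m / 10 :=
      (Nat.le_div_iff_mul_le (by omega)).mpr (by rw [← Nat.pow_succ]; exact h1)
    have hdiv2 : m / 10 < 10 ^ (d + 1) :=
      (Nat.div_lt_iff_lt_mul (by omega)).mpr (by rw [← Nat.pow_succ]; exact h2)
    rw [nd, if_neg (by omega), ih (m / 10) hdiv1 hdiv2]
    omega

theorem slen_block (d : Nat) (i : Int) (h1 : (10 : Int) ^ d ≤ i) (h2 : i < (10 : Int) ^ (d + 1)) :
    slen i = (d : Int) + 1 := by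
  have hp : (1 : Int) ≤ (10 : Int) ^ d := one_le_pow₀ (by omega)
  have hi1 : 1 ≤ i := le_trans hp h1
  have hc : ((10 ^ d : Nat) : Int) = (10 : Int) ^ d := by push_cast; ring
  have hc2 : ((10 ^ (d + 1) : Nat) : Int) = (10 : Int) ^ (d + 1) := by push_cast; ring
  have hb1 : 10 ^ d ≤ i.toNat := by omega
  have hb2 : i.toNat < 10 ^ (d + 1) := by omega
  rw [slen_eq_nd i hi1, nd_block d i.toNat hb1 hb2]
  push_cast; ring

theorem dsum_empty (a b : Int) (h : b ≤ a) : dsum a b = 0 := by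
  unfold dsum
  rw [PySem.List.pyRange_one_eq_nil h]
  simp

theorem dsum_split (a b c : Int) (h1 : a ≤ b) (h2 : b ≤ c) :
    dsum a c = dsum a b + dsum b c := by
  unfold dsum
  rw [PySem.List.pyRange_one_append a b c h1 h2, List.map_append, List.sum_append]

theorem dsum_cons (a b : Int) (h : a < b) : dsum a b = slen a + dsum (a + 1) b := by
  unfold dsum
  rw [PySem.List.pyRange_one_cons h]
  simp

theorem dsum_const_block (d : Nat) (p b : Int) (hp : p = (10 : Int) ^ d)
    (hb : b ≤ (10 : Int) ^ (d + 1)) (hab : p ≤ b) :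
    dsum p b = (b - p) * ((d : Int) + 1) := by
  unfold dsum
  have hmap : (PySem.List.pyRange p b 1).map slen
      = (PySem.List.pyRange p b 1).map (fun _ => (d : Int) + 1) := by
    apply List.map_congr_left
    intro i hi
    rw [PySem.List.mem_pyRange_one] at hi
    exact slen_block d i (by omega) (by omega)
  rw [hmap, PySem.List.sum_map_const_int, PySem.List.length_pyRange_one]
  have : ((b - p).toNat : Int) = b - p := by omega
  rw [this]

theorem maxlS_spec : ∀ (fuel : Nat) (m p total : Int) (d : Nat),
    (m + 1 - p).toNat ≤ fuel → p = (10 : Int) ^ d →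
    maxlS fuel m p ((d : Int) + 1) total = total + dsum p (m + 1) := by
  intro fuel
  induction fuel with
  | zero =>
    intro m p total d ht hp
    rw [maxlS, dsum_empty p (m + 1) (by omega)]
    ring
  | succ fuel ih =>
    intro m p total d ht hp
    have hp1 : (1 : Int) ≤ p := hp ▸ one_le_pow₀ (by omega)
    rw [maxlS]
    by_cases hpm : p ≤ m
    · rw [if_pos hpm]
      have hp10 : p * 10 = (10 : Int) ^ (d + 1) := by rw [hp]; ring
      have key := ih m (p * 10)
        (total + (min m (p * 10 - 1) - p + 1) * ((d : Int) + 1)) (d + 1) (by omega) hp10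
      have hcast : ((d : Int) + 1) + 1 = (((d + 1 : Nat)) : Int) + 1 := by push_cast; ring
      rw [hcast, key]
      -- first block: [p, min (m+1) (p*10))
      have hhi : min m (p * 10 - 1) + 1 = min (m + 1) (p * 10) := by omega
      have hsplit : dsum p (m + 1)
          = dsum p (min (m + 1) (p * 10)) + dsum (min (m + 1) (p * 10)) (m + 1) := by
        apply dsum_split <;> omega
      have hblock : dsum p (min (m + 1) (p * 10)) = (min (m + 1) (p * 10) - p) * ((d : Int) + 1) := by
        apply dsum_const_block d p _ hp (by omega) (by omega)
      have htail : dsum (min (m + 1) (p * 10)) (m + 1) = dsum (p * 10) (m + 1) := by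
        by_cases hc : p * 10 ≤ m + 1
        · rw [min_eq_right hc]
        · rw [min_eq_left (by omega), dsum_empty _ _ (by omega), dsum_empty _ _ (by omega)]
      have hfix : min m (p * 10 - 1) - p + 1 = min (m + 1) (p * 10) - p := by omega
      rw [hsplit, hblock, htail, hfix]
      ring
    · rw [if_neg hpm]
      rw [dsum_empty p (m + 1) (by omega)]
      ring

-- A's inner loop over one group [c, e]: consumes the rest of the group and closes it.
theorem A_inner (n a g e : Int) (he : e = min (a + g - 1) n) (hen : e ≤ n) :
    ∀ (t : Nat) (c : Int) (s : String) (l : Int), (e - c).toNat = t → a ≤ c → c ≤ e →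
    (PySem.List.pyRange c (e + 1) 1).foldl (maxlStep n) (g, c - a, s, l)
      = (g + 1, 0, "", max l (PySem.Str.len s + dsum c (e + 1) + (e - c))) := by
  intro t
  induction t with
  | zero =>
    intro c s l ht hac hce
    have hc : c = e := by omega
    subst hc
    rw [PySem.List.pyRange_one_singleton]
    simp only [List.foldl_cons, List.foldl_nil]
    have hcond : c - a + 1 = g ∨ c = n := by omega
    simp only [maxlStep, if_pos hcond]
    have hd : dsum c (c + 1) = slen c := by
      rw [dsum_cons c (c + 1) (by omega), dsum_empty _ _ (by omega)]; ring
    rw [hd]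
    simp [PySem.Str.len, slen]
  | succ t ih =>
    intro c s l ht hac hce
    have hce' : c < e := by omega
    rw [PySem.List.pyRange_one_cons (by omega)]
    simp only [List.foldl_cons]
    have hcond : ¬ (c - a + 1 = g ∨ c = n) := by omega
    simp only [maxlStep, if_neg hcond]
    have hst : (c - a + 1 : Int) = (c + 1) - a := by ring
    simp only [hst]
    rw [ih (c + 1) _ l (by omega) (by omega) (by omega)]
    rw [dsum_cons c (e + 1) (by omega)]
    have hlen : PySem.Str.len (s ++ PySem.Int.toStr c ++ " ")
        = PySem.Str.len s + slen c + 1 := by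
      simp [PySem.Str.len, slen]
      omega
    rw [hlen]
    congr 3
    omega

-- A's whole loop, group by group, equals B's group loop.
theorem A_outer (n : Int) : ∀ (fuel : Nat) (a g l : Int), (n + 1 - a).toNat ≤ fuel →
    1 ≤ a → 1 ≤ g →
    ((PySem.List.pyRange a (n + 1) 1).foldl (maxlStep n) (g, 0, "", l)).2.2.2
      = maxlLoop fuel n a g l (dsum 1 a) := by
  intro fuel
  induction fuel with
  | zero =>
    intro a g l ht ha hg
    rw [maxlLoop, PySem.List.pyRange_one_eq_nil (by omega)]
    simp
  | succ fuel ih =>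
    intro a g l ht ha hg
    by_cases han : a ≤ n
    · have hae : a ≤ min (a + g - 1) n := by omega
      rw [PySem.List.pyRange_one_append a (min (a + g - 1) n + 1) (n + 1) (by omega) (by omega),
        List.foldl_append]
      have h0 : (g, (0 : Int), ("" : String), l) = (g, a - a, ("" : String), l) := by
        norm_num
      rw [h0, A_inner n a g (min (a + g - 1) n) rfl (by omega)
        (min (a + g - 1) n - a).toNat a "" l rfl (le_refl a) hae]
      have hlen0 : PySem.Str.len "" = 0 := by decide
      rw [hlen0]
      rw [ih (min (a + g - 1) n + 1) (g + 1)
        (max l (0 + dsum a (min (a + g - 1) n + 1) + (min (a + g - 1) n - a)))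
        (by omega) (by omega) (by omega)]
      have hse : maxlS (min (a + g - 1) n + 1).toNat (min (a + g - 1) n) 1 1 0
          = dsum 1 (min (a + g - 1) n + 1) := by
        have := maxlS_spec (min (a + g - 1) n + 1).toNat (min (a + g - 1) n) 1 0 0
          (by omega) (by norm_num)
        simpa using this
      conv_rhs => rw [maxlLoop, if_pos han]
      simp only [hse]
      have hbest : 0 + dsum a (min (a + g - 1) n + 1) + (min (a + g - 1) n - a)
          = dsum 1 (min (a + g - 1) n + 1) - dsum 1 a + (min (a + g - 1) n - a) := by
        have hsplit : dsum 1 (min (a + g - 1) n + 1)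
            = dsum 1 a + dsum a (min (a + g - 1) n + 1) := by
          apply dsum_split <;> omega
        omega
      rw [hbest]
    · rw [maxlLoop, if_neg han]
      rw [PySem.List.pyRange_one_eq_nil (by omega)]
      simp

-- ===== VERDICT (by name: the statement is the Claim_ definition above) =====
theorem maxl_spec : Claim_equal_maxl := by
  intro n _
  unfold Spec_maxl maxl maxl_alt
  rw [A_outer n (n + 1).toNat 1 1 (-1) (by omega) (by omega) (by omega)]
  rw [dsum_empty 1 1 (by omega)]
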